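-- pv_equiv track=rewrite | github.com/splasky/Python-datastore-sqlalchemy | sqlalchemy_datastore/datastore_dbapi.py | _extract_base_query_for_filter
-- ===== SOURCE A (Python) =====
-- def _extract_base_query_for_filter(statement: str) -> str:
--     """Extract base query without WHERE clause for client-side filtering."""
--     # Remove WHERE clause to get all data
--     upper = statement.upper()
--     where_idx = upper.find(" WHERE ")
--     if where_idx > 0:
--         # Find the end of WHERE (before ORDER BY, LIMIT, OFFSET)
--         end_patterns = [" ORDER BY ", " LIMIT ", " OFFSET "]
--         end_idx = len(statement)
--         for pattern in end_patterns:
--             idx = upper.find(pattern, where_idx)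
--             if idx > 0 and idx < end_idx:
--                 end_idx = idx
--         # Remove WHERE clause
--         base = statement[:where_idx] + statement[end_idx:]
--         return base.strip()
--     return statement
-- ===== SOURCE B (Python) =====
-- def _extract_base_query_for_filter(statement: str) -> str:
--     """Extract base query without WHERE clause for client-side filtering."""
--     upper = statement.upper()
--     where_idx = upper.find(" WHERE ")
--     if where_idx <= 0:
--         return statement
--     # single left-to-right scan for the first terminator keyword after WHERE
--     end_idx = len(statement)
--     for i in range(where_idx, len(upper)):
--         if upper.startswith((" ORDER BY ", " LIMIT ", " OFFSET "), i):
--             end_idx = i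
--             break
--     return (statement[:where_idx] + statement[end_idx:]).strip()
-- ===== Notes on version B (the rewrite author's own statement) =====
-- stated objective: alternative
-- what changed: A finds each terminator keyword with a separate full findFrom search and combines the three results with a running-minimum accumulator; B does a single position-major left-to-right scan from the WHERE index and stops at the first position where any terminator keyword starts.
import Mathlib
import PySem

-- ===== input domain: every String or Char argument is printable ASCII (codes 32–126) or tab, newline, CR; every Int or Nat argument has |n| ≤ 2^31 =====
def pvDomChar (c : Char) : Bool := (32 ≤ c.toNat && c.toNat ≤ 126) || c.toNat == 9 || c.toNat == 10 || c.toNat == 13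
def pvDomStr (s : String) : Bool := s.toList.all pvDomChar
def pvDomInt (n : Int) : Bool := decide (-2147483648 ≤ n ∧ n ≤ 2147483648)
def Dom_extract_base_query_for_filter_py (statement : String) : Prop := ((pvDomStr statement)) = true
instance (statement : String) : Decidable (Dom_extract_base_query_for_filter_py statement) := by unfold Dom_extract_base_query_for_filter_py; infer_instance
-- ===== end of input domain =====

-- B replaces A's pattern-major loop (three full findFrom searches combined by a running
-- minimum) with a single position-major left-to-right scan that stops at the first
-- terminator keyword; same return value, alternative algorithm.

-- ===== PORT A =====
def extract_base_query_for_filter_py (statement : String) : String :=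
  let upper := PySem.Str.upper statement
  let where_idx := PySem.Str.find upper " WHERE "
  if 0 < where_idx then
    let end_patterns : List String := [" ORDER BY ", " LIMIT ", " OFFSET "]
    let end_idx := end_patterns.foldl
      (fun end_idx pattern =>
        let idx := PySem.Str.findFrom upper pattern where_idx
        if 0 < idx ∧ idx < end_idx then idx else end_idx)
      (PySem.Str.len statement)
    let base := PySem.Str.slice statement none (some where_idx) ++
                PySem.Str.slice statement (some end_idx) none
    PySem.Str.strip base
  else statement

-- ===== PORT B =====
def extract_base_query_for_filter_py_alt (statement : String) : String :=
  let upper := PySem.Str.upper statement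
  let where_idx := PySem.Str.find upper " WHERE "
  if where_idx ≤ 0 then statement
  else
    -- for i in range(where_idx, len(upper)): if upper.startswith((...), i): end_idx = i; break
    -- upper.startswith(p, i) is ported as a prefix test on the drop at i (exact: 0 ≤ i here)
    let end_idx :=
      ((PySem.List.pyRange where_idx (PySem.Str.len upper)).find?
        (fun i => [" ORDER BY ", " LIMIT ", " OFFSET "].any
          (fun p => PySem.Chars.startswith ((PySem.Str.upper statement).toList.drop i.toNat) p.toList))).getD
        (PySem.Str.len statement)
    PySem.Str.strip (PySem.Str.slice statement none (some where_idx) ++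
                     PySem.Str.slice statement (some end_idx) none)

-- ===== PRECONDITION & SPEC =====
def Spec_extract_base_query_for_filter_py (statement : String) (out : String) : Prop := out = extract_base_query_for_filter_py_alt statement
instance (statement : String) (out : String) : Decidable (Spec_extract_base_query_for_filter_py statement out) := by unfold Spec_extract_base_query_for_filter_py; infer_instance

-- ===== CLAIM (what is proved, stated in full; the proofs are below) =====
def Claim_equal_extract_base_query_for_filter_py : Prop := ∀ (statement : String), Dom_extract_base_query_for_filter_py statement → Spec_extract_base_query_for_filter_py statement (extract_base_query_for_filter_py statement)

-- ===== LEMMAS AND PROOFS =====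

-- `cond u ps i`: some pattern of `ps` starts at position `i` of `u`
def pvCond (u : List Char) (ps : List String) (i : Nat) : Prop := ∃ p ∈ ps, p.toList <+: u.drop i

-- A's fold, abstracted
def pvFoldEnd (u : List Char) (k : Int) (ps : List String) (acc : Int) : Int :=
  ps.foldl
    (fun e pattern =>
      let idx := PySem.Chars.findFrom u pattern.toList k
      if 0 < idx ∧ idx < e then idx else e)
    acc

-- B's scan, abstracted
def pvScanEnd (u : List Char) (k n d : Int) (ps : List String) : Int :=
  ((PySem.List.pyRange k n).find?
    (fun i => ps.any (fun p => PySem.Chars.startswith (u.drop i.toNat) p.toList))).getD d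

lemma pvFoldEnd_le_acc (u : List Char) (k : Int) (ps : List String) (acc : Int) :
    pvFoldEnd u k ps acc ≤ acc := by
  induction ps generalizing acc with
  | nil => simp [pvFoldEnd]
  | cons p ps ih =>
    simp only [pvFoldEnd, List.foldl_cons] at *
    refine le_trans (ih _) ?_
    split <;> omega

lemma pvFoldEnd_le_find (u : List Char) (k : Int) (ps : List String) (acc : Int)
    (p : String) (hp : p ∈ ps) (hpos : 0 < PySem.Chars.findFrom u p.toList k) :
    pvFoldEnd u k ps acc ≤ PySem.Chars.findFrom u p.toList k := by
  induction ps generalizing acc with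
  | nil => simp at hp
  | cons q ps ih =>
    simp only [pvFoldEnd, List.foldl_cons] at *
    rcases List.mem_cons.mp hp with hq | hp
    · subst hq
      refine le_trans (pvFoldEnd_le_acc u k ps _) ?_
      split <;> omega
    · exact ih _ hp

lemma pvFoldEnd_cases (u : List Char) (k : Int) (ps : List String) (acc : Int) :
    pvFoldEnd u k ps acc = acc ∨
    ∃ p ∈ ps, pvFoldEnd u k ps acc = PySem.Chars.findFrom u p.toList k ∧
      0 < PySem.Chars.findFrom u p.toList k := by
  induction ps generalizing acc with
  | nil => left; simp [pvFoldEnd]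
  | cons q ps ih =>
    simp only [pvFoldEnd, List.foldl_cons] at *
    rcases ih (if 0 < PySem.Chars.findFrom u q.toList k ∧ PySem.Chars.findFrom u q.toList k < acc
        then PySem.Chars.findFrom u q.toList k else acc) with h | ⟨p, hp, h, hps⟩
    · rw [h]
      split
      · right; exact ⟨q, by simp, rfl, by omega⟩
      · left; rfl
    · right; exact ⟨p, by simp [hp], h, hps⟩

-- characterization of A's fold as the least matching position in [k, n), default n
lemma pvFoldEnd_char (u : List Char) (k : Nat) (ps : List String)
    (hk1 : 1 ≤ k) (hkn : k ≤ u.length) :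
    ∀ e, e = pvFoldEnd u (k : Int) ps (u.length : Int) →
    (k : Int) ≤ e ∧ e ≤ (u.length : Int) ∧
    (e < (u.length : Int) → pvCond u ps e.toNat) ∧
    (∀ i : Nat, k ≤ i → (i : Int) < e → ¬ pvCond u ps i) := by
  intro e hE
  have hle : e ≤ (u.length : Int) := by rw [hE]; exact pvFoldEnd_le_acc u k ps _
  have hcases := pvFoldEnd_cases u (k : Int) ps (u.length : Int)
  rw [← hE] at hcases
  have hmin : ∀ i : Nat, k ≤ i → (i : Int) < e → ¬ pvCond u ps i := by
    intro i hki hie ⟨p, hp, hpre⟩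
    have hinf : p.toList <:+: u.drop k := by
      have : u.drop i <:+ u.drop k := List.drop_suffix_drop_left u (by omega)
      exact hpre.isInfix.trans this.isInfix
    have hne : PySem.Chars.findFrom u p.toList (k : Int) ≠ -1 := by
      rw [ne_eq, PySem.Chars.findFrom_natCast_eq_neg_one_iff u p.toList k hkn]
      simp [hinf]
    obtain ⟨hkf, _, hminp⟩ := PySem.Chars.findFrom_natCast_spec u p.toList k hkn hne
    have hfi : (PySem.Chars.findFrom u p.toList (k : Int)).toNat ≤ i := by
      by_contra hlt
      exact hminp i hki (by omega) hpre
    have hEf := pvFoldEnd_le_find u (k : Int) ps (u.length : Int) p hp (by omega)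
    rw [← hE] at hEf
    omega
  refine ⟨?_, hle, ?_, hmin⟩
  · rcases hcases with h | ⟨p, _, h, hpos⟩
    · rw [h]; exact_mod_cast hkn
    · have hne : PySem.Chars.findFrom u p.toList (k : Int) ≠ -1 := by omega
      obtain ⟨hkf, _, _⟩ := PySem.Chars.findFrom_natCast_spec u p.toList k hkn hne
      omega
  · intro hlt
    rcases hcases with h | ⟨p, hp, h, hpos⟩
    · omega
    · have hne : PySem.Chars.findFrom u p.toList (k : Int) ≠ -1 := by omega
      obtain ⟨_, hpre, _⟩ := PySem.Chars.findFrom_natCast_spec u p.toList k hkn hne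
      exact ⟨p, hp, by rw [h]; exact hpre⟩

-- characterization of B's scan: first position in [k, n) where some pattern matches, default n
lemma pvScanEnd_char (u : List Char) (ps : List String) (k : Nat) (hkn : k ≤ u.length) :
    ∀ e, e = pvScanEnd u (k : Int) (u.length : Int) (u.length : Int) ps →
    (k : Int) ≤ e ∧ e ≤ (u.length : Int) ∧
    (e < (u.length : Int) → pvCond u ps e.toNat) ∧
    (∀ i : Nat, k ≤ i → (i : Int) < e → ¬ pvCond u ps i) := by
  intro e hE
  have hcond : ∀ i : Nat,
      (ps.any (fun p => PySem.Chars.startswith (u.drop ((i : Int)).toNat) p.toList) = true)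
        ↔ pvCond u ps i := by
    intro i
    simp [pvCond, List.any_eq_true, PySem.Chars.startswith_iff]
  subst hE
  induction hm : u.length - k generalizing k with
  | zero =>
    have hk : k = u.length := by omega
    rw [pvScanEnd, PySem.List.pyRange_one_eq_nil (by omega)]
    simp only [List.find?_nil, Option.getD_none]
    refine ⟨by omega, le_refl _, by omega, ?_⟩
    intro i h1 h2 _
    omega
  | succ m ih =>
    have hk : k < u.length := by omega
    rw [pvScanEnd, PySem.List.pyRange_one_cons (by exact_mod_cast hk)]
    by_cases hc : ps.any (fun p => PySem.Chars.startswith (u.drop ((k : Int)).toNat) p.toList) = true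
    · rw [List.find?_cons_of_pos (a := ((k : Nat) : Int)) (p := fun i => ps.any fun p => PySem.Chars.startswith (List.drop i.toNat u) p.toList) (by exact hc)]
      simp only [Option.getD_some]
      refine ⟨le_refl _, by omega, fun _ => ?_, fun i h1 h2 => by omega⟩
      simpa using (hcond k).mp hc
    · rw [Bool.not_eq_true] at hc
      rw [List.find?_cons_of_neg (a := ((k : Nat) : Int)) (p := fun i => ps.any fun p => PySem.Chars.startswith (List.drop i.toNat u) p.toList) (by simpa [List.any_eq_false] using hc)]
      have hcast : ((k : Int) + 1) = ((k + 1 : Nat) : Int) := by push_cast; ring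
      rw [hcast]
      obtain ⟨h1, h2, h3, h4⟩ := ih (k + 1) (by omega) (by omega)
      rw [pvScanEnd] at h1 h2 h3 h4
      refine ⟨by omega, h2, h3, ?_⟩
      intro i hki hie
      rcases Nat.eq_or_lt_of_le hki with heq | hlt
      · subst heq
        intro hcc
        exact absurd ((hcond k).mpr hcc) (by simpa [List.any_eq_false] using hc)
      · exact h4 i (by omega) hie

-- main generic equality
lemma pvFold_eq_scan (u : List Char) (ps : List String) (k : Nat)
    (hk1 : 1 ≤ k) (hkn : k ≤ u.length) :
    pvFoldEnd u (k : Int) ps (u.length : Int)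
      = pvScanEnd u (k : Int) (u.length : Int) (u.length : Int) ps := by
  obtain ⟨ha1, ha2, ha3, ha4⟩ :=
    pvFoldEnd_char u k ps hk1 hkn (pvFoldEnd u (k : Int) ps (u.length : Int)) rfl
  obtain ⟨hb1, hb2, hb3, hb4⟩ :=
    pvScanEnd_char u ps k hkn (pvScanEnd u (k : Int) (u.length : Int) (u.length : Int) ps) rfl
  set a := pvFoldEnd u (k : Int) ps (u.length : Int) with hA
  set b := pvScanEnd u (k : Int) (u.length : Int) (u.length : Int) ps with hB
  rcases lt_trichotomy a b with h | h | h
  · exfalso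
    have hcond := ha3 (by omega)
    exact hb4 a.toNat (by omega) (by omega) hcond
  · exact h
  · exfalso
    have hcond := hb3 (by omega)
    exact ha4 b.toNat (by omega) (by omega) hcond

-- ===== VERDICT (by name: the statement is the Claim_ definition above) =====
theorem extract_base_query_for_filter_py_spec : Claim_equal_extract_base_query_for_filter_py := by
  intro statement _
  unfold Spec_extract_base_query_for_filter_py
  simp only [extract_base_query_for_filter_py, extract_base_query_for_filter_py_alt]
  set u : List Char := (PySem.Str.upper statement).toList with hu
  set w : Int := PySem.Str.find (PySem.Str.upper statement) " WHERE " with hwdef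
  by_cases hw : 0 < w
  · rw [if_pos hw, if_neg (by omega : ¬ w ≤ 0)]
    have hwC : w = PySem.Chars.find u " WHERE ".toList := rfl
    have hne : PySem.Chars.findFrom u " WHERE ".toList ((0 : Nat) : Int) ≠ -1 := by
      rw [Nat.cast_zero, PySem.Chars.findFrom_zero, ← hwC]; omega
    obtain ⟨-, hpre, -⟩ :=
      PySem.Chars.findFrom_natCast_spec u " WHERE ".toList 0 (Nat.zero_le _) hne
    rw [Nat.cast_zero, PySem.Chars.findFrom_zero, ← hwC] at hpre
    have hlenpre : (" WHERE ".toList).length ≤ (u.drop w.toNat).length := hpre.length_le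
    have h7 : (" WHERE ".toList).length = 7 := by decide
    rw [List.length_drop] at hlenpre
    have hkn : w.toNat ≤ u.length := by omega
    have hk1 : 1 ≤ w.toNat := by omega
    have hlen : PySem.Str.len statement = (u.length : Int) := by
      rw [PySem.Str.len_eq, hu, PySem.Str.toList_upper, PySem.Chars.upper, List.length_map]
    have hlenU : PySem.Str.len (PySem.Str.upper statement) = (u.length : Int) :=
      PySem.Str.len_eq _
    have key : ∀ e1 e2 : Int, e1 = e2 →
        PySem.Str.strip (PySem.Str.slice statement none (some w) ++
            PySem.Str.slice statement (some e1) none)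
          = PySem.Str.strip (PySem.Str.slice statement none (some w) ++
            PySem.Str.slice statement (some e2) none) := by
      intro e1 e2 h; rw [h]
    apply key
    show pvFoldEnd u w [" ORDER BY ", " LIMIT ", " OFFSET "] (PySem.Str.len statement)
       = pvScanEnd u w (PySem.Str.len (PySem.Str.upper statement)) (PySem.Str.len statement)
           [" ORDER BY ", " LIMIT ", " OFFSET "]
    have hwk : w = ((w.toNat : Nat) : Int) := by omega
    rw [hlen, hlenU, hwk]
    exact pvFold_eq_scan u _ w.toNat hk1 hkn
  · rw [if_neg hw, if_pos (by omega : w ≤ 0)]
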